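-- pv_equiv track=rewrite | github.com/TimButters/advent-of-code | 2024/day-12/python/solution.py | perimeter_fences
-- ===== SOURCE A (Python) =====
-- Point = tuple[int, int]
--
-- Blocks = list[set[Point]]
--
-- def surrounding_points(p: Point) -> list[Point]:
--     x, y = p
--     return [(x - 1, y), (x + 1, y), (x, y - 1), (x, y + 1)]
--
-- def perimeter_fences(mapping: dict[str, Blocks]):
--     perimeters = []
--     for c, groups in mapping.items():
--         for points in groups:
--             neighbours = []
--             for p in points:
--                 neighbours += list(points.intersection(surrounding_points(p)))
--             perimeters.append((len(points), 4 * len(points) - len(neighbours)))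
--     return perimeters
-- ===== SOURCE B (Python) =====
-- def perimeter_fences(mapping):
--     perimeters = []
--     for c, groups in mapping.items():
--         for points in groups:
--             n = len(points)
--             # count each undirected internal border once, via two sorted scans
--             by_col = sorted(points)                       # (x, y): vertical neighbours adjacent
--             by_row = sorted(points, key=lambda p: (p[1], p[0]))  # (y, x): horizontal neighbours adjacent
--             e = 0
--             for a, b in zip(by_col, by_col[1:]):
--                 if b[0] == a[0] and b[1] == a[1] + 1:
--                     e += 1
--             for a, b in zip(by_row, by_row[1:]):
--                 if b[1] == a[1] and b[0] == a[0] + 1: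
--                     e += 1
--             perimeters.append((n, 4 * n - 2 * e))
--     return perimeters
-- ===== Notes on version B (the rewrite author's own statement) =====
-- stated objective: alternative
-- what changed: Per region, instead of summing directed adjacencies via a set-intersection of each point's 4 neighbours, B sorts the points twice (column-major and row-major) and counts each undirected internal border once as consecutive entries of a sorted scan, returning (area, 4*area - 2*edges).
import Mathlib
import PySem

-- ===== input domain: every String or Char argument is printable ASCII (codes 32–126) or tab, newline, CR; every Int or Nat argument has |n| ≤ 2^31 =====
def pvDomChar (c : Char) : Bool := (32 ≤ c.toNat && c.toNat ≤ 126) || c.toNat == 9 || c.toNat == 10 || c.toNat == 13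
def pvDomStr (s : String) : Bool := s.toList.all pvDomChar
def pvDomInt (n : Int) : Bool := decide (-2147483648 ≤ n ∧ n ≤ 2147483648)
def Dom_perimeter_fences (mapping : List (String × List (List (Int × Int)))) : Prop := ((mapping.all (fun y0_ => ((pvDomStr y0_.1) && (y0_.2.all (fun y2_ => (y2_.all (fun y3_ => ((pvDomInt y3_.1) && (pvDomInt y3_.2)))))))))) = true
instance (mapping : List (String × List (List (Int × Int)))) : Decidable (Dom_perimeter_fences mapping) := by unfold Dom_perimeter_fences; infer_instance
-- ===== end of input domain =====

-- B replaces A's per-point set-intersection count of directed adjacencies by two sorted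
-- scans that count each undirected internal border once (alternative decomposition, not faster).
-- Each inner list encodes a Python set; both ports marshal it with PySem.Set.ofList.

-- ===== PORT A =====
def surrounding_points (p : Int × Int) : List (Int × Int) :=
  [(p.1 - 1, p.2), (p.1 + 1, p.2), (p.1, p.2 - 1), (p.1, p.2 + 1)]

-- the body of A's inner loop: one region (a Python set of points) -> (area, perimeter)
def pfA_group (points : PySem.Set (Int × Int)) : Int × Int :=
  let neighbours : List (Int × Int) :=
    points.foldl (fun ns p => ns ++ PySem.Set.inter points (surrounding_points p)) []
  ((points.length : Int), 4 * (points.length : Int) - (neighbours.length : Int))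

def perimeter_fences (mapping : List (String × List (List (Int × Int)))) : List (Int × Int) :=
  mapping.foldl (fun perimeters cg =>
    cg.2.foldl (fun perimeters points =>
      perimeters ++ [pfA_group (PySem.Set.ofList points)]) perimeters) []

-- ===== PORT B =====
-- the body of B's inner loop: sort twice, count consecutive adjacent pairs
def pfB_group (points : PySem.Set (Int × Int)) : Int × Int :=
  let n : Int := (points.length : Int)
  let byCol := PySem.List.sorted2 points (fun p => p.1) (fun p => p.2) false
  let byRow := PySem.List.sorted2 points (fun p => p.2) (fun p => p.1) false
  let e1 : Int := (byCol.zip byCol.tail).foldl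
    (fun e ab => if ab.2.1 = ab.1.1 ∧ ab.2.2 = ab.1.2 + 1 then e + 1 else e) 0
  let e2 : Int := (byRow.zip byRow.tail).foldl
    (fun e ab => if ab.2.2 = ab.1.2 ∧ ab.2.1 = ab.1.1 + 1 then e + 1 else e) 0
  (n, 4 * n - 2 * (e1 + e2))

def perimeter_fences_alt (mapping : List (String × List (List (Int × Int)))) : List (Int × Int) :=
  mapping.foldl (fun perimeters cg =>
    cg.2.foldl (fun perimeters points =>
      perimeters ++ [pfB_group (PySem.Set.ofList points)]) perimeters) []

-- ===== PRECONDITION & SPEC =====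
def Spec_perimeter_fences (mapping : List (String × List (List (Int × Int)))) (out : List (Int × Int)) : Prop := out = perimeter_fences_alt mapping
instance (mapping : List (String × List (List (Int × Int)))) (out : List (Int × Int)) : Decidable (Spec_perimeter_fences mapping out) := by unfold Spec_perimeter_fences; infer_instance

-- ===== CLAIM (what is proved, stated in full; the proofs are below) =====
def Claim_equal_perimeter_fences : Prop := ∀ (mapping : List (String × List (List (Int × Int)))), Dom_perimeter_fences mapping → Spec_perimeter_fences mapping (perimeter_fences mapping)

-- ===== LEMMAS AND PROOFS =====

-- a counting foldl (0/+1) is countP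
lemma foldl_if_count {γ : Type} (P : γ → Prop) [DecidablePred P] :
    ∀ (l : List γ) (e : Int),
      l.foldl (fun e x => if P x then e + 1 else e) e = e + (l.countP (fun x => decide (P x)) : Int) := by
  intro l
  induction l with
  | nil => intro e; simp
  | cons x t ih =>
    intro e
    by_cases h : P x <;> simp [List.countP_cons, h, ih] <;> push_cast <;> ring

-- in a strictly sorted list, "succ a follows a" pairs are exactly the points whose succ is present
lemma scan_count {α : Type} [DecidableEq α] (succ : α → α) (lt : α → α → Prop)
    (hsucc : ∀ a, lt a (succ a)) (hirr : ∀ a, ¬ lt a a)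
    (htr : ∀ {a b c}, lt a b → lt b c → lt a c)
    (hdense : ∀ a b, lt a b → ¬ lt b (succ a)) :
    ∀ (L : List α), L.Pairwise lt →
      (L.zip L.tail).countP (fun ab => decide (ab.2 = succ ab.1))
        = L.countP (fun p => decide (succ p ∈ L)) := by
  intro L
  induction L with
  | nil => intro _; simp
  | cons a L ih =>
    cases L with
    | nil =>
      intro _
      have h : ¬ (succ a = a) := by
        intro h
        have h2 := hsucc a
        rw [h] at h2
        exact hirr a h2
      simp [h]
    | cons b t =>
      intro hp
      have hpc := List.pairwise_cons.mp hp
      have halt : ∀ x ∈ b :: t, lt a x := hpc.1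
      have hp' : (b :: t).Pairwise lt := hpc.2
      have hab : lt a b := halt b (by simp)
      have hbt : ∀ x ∈ t, lt b x := (List.pairwise_cons.mp hp').1
      -- membership of succ p (p in the tail) never hits the head a
      have hcongr : List.countP (fun p => decide (succ p ∈ a :: b :: t)) (b :: t)
          = List.countP (fun p => decide (succ p ∈ b :: t)) (b :: t) := by
        apply List.countP_congr
        intro x hx
        simp only [decide_eq_true_iff, List.mem_cons]
        constructor
        · rintro (h1 | h2)
          · exact absurd (htr (halt x hx) (h1 ▸ hsucc x)) (hirr a)
          · exact h2
        · intro h; exact Or.inr h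
      have hzip : (a :: b :: t).zip (b :: t) = (a, b) :: ((b :: t).zip t) := rfl
      simp only [List.tail_cons] at ih ⊢
      rw [hzip, List.countP_cons]
      conv_rhs => rw [List.countP_cons]
      rw [hcongr, ih hp']
      by_cases hb : b = succ a
      · have hmem : succ a ∈ a :: b :: t := by simp [hb]
        simp [hb, hmem]
      · have hnot : succ a ∉ a :: b :: t := by
          intro hm
          rcases List.mem_cons.mp hm with h1 | hm'
          · have h2 := hsucc a
            rw [h1] at h2
            exact hirr a h2
          · rcases List.mem_cons.mp hm' with h2 | h3
            · exact hb h2.symm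
            · exact hdense a b hab (hbt _ h3)
        simp [hb, hnot]

-- sorted2 is PySem.List.sorted with the lexicographic key
lemma sorted2_eq_sorted_lex (xs : List (Int × Int)) (k1 k2 : (Int × Int) → Int) :
    PySem.List.sorted2 xs k1 k2 false
      = PySem.List.sorted xs (fun p => toLex (k1 p, k2 p)) := by
  rw [PySem.List.sorted_eq_foldl_insertBy]
  show xs.foldl (fun acc x => PySem.List.insertBy _ x acc) [] = _
  congr 1
  funext acc x
  congr 1
  funext a b
  have h : (toLex (k1 a, k2 a) < toLex (k1 b, k2 b)) ↔
      (k1 a < k1 b ∨ (¬ k1 b < k1 a ∧ k2 a < k2 b)) := by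
    rw [Prod.Lex.lt_iff]
    simp only [ofLex_toLex]
    omega
  show (fun a b => decide (k1 a < k1 b) || (!decide (k1 b < k1 a) && decide (k2 a < k2 b))) a b = _
  rw [show decide (toLex (k1 a, k2 a) < toLex (k1 b, k2 b))
        = decide (k1 a < k1 b ∨ (¬ k1 b < k1 a ∧ k2 a < k2 b)) from decide_eq_decide.mpr h]
  by_cases h1 : k1 a < k1 b <;> by_cases h2 : k1 b < k1 a <;> by_cases h3 : k2 a < k2 b <;>
    simp [h1, h2, h3]

-- on a duplicate-free list, sorted2 is strictly lex-increasing
lemma sorted2_pairwise_lt (xs : List (Int × Int)) (h : xs.Nodup) (k1 k2 : (Int × Int) → Int)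
    (hinj : ∀ a b : Int × Int, k1 a = k1 b → k2 a = k2 b → a = b) :
    (PySem.List.sorted2 xs k1 k2 false).Pairwise
      (fun a b => k1 a < k1 b ∨ (k1 a = k1 b ∧ k2 a < k2 b)) := by
  rw [sorted2_eq_sorted_lex]
  have hle := PySem.List.sorted_pairwise xs (fun p => toLex (k1 p, k2 p))
  have hnd : (PySem.List.sorted xs (fun p => toLex (k1 p, k2 p))).Nodup :=
    (PySem.List.sorted_perm xs (fun p => toLex (k1 p, k2 p)) false).symm.nodup h
  refine (hle.and hnd).imp ?_
  rintro a b ⟨hle', hne⟩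
  have : toLex ((k1 a, k2 a) : Int × Int) ≠ toLex (k1 b, k2 b) := by
    intro he
    have := congrArg ofLex he
    simp only [ofLex_toLex, Prod.mk.injEq] at this
    exact hne (hinj a b this.1 this.2)
  have hlt := lt_of_le_of_ne hle' this
  rw [Prod.Lex.lt_iff] at hlt
  simpa using hlt

-- length of a membership filter is symmetric between two duplicate-free lists
lemma filter_mem_length_comm (S T : List (Int × Int)) (hS : S.Nodup) (hT : T.Nodup) :
    (S.filter (fun q => decide (q ∈ T))).length = (T.filter (fun q => decide (q ∈ S))).length := by
  have h1 : (S.filter (fun q => decide (q ∈ T))).toFinset = S.toFinset ∩ T.toFinset := by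
    rw [List.toFinset_filter]
    ext x
    simp [List.mem_toFinset]
  have h2 : (T.filter (fun q => decide (q ∈ S))).toFinset = T.toFinset ∩ S.toFinset := by
    rw [List.toFinset_filter]
    ext x
    simp [List.mem_toFinset]
  rw [← List.toFinset_card_of_nodup (hS.filter _), ← List.toFinset_card_of_nodup (hT.filter _),
    h1, h2, Finset.inter_comm]

-- reflection symmetry of adjacency counts, x direction
lemma countP_shift_x (S : List (Int × Int)) (h : S.Nodup) :
    S.countP (fun p => decide ((p.1 - 1, p.2) ∈ S)) = S.countP (fun p => decide ((p.1 + 1, p.2) ∈ S)) := by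
  rw [List.countP_eq_length_filter, List.countP_eq_length_filter,
    ← List.toFinset_card_of_nodup (h.filter _), ← List.toFinset_card_of_nodup (h.filter _),
    List.toFinset_filter, List.toFinset_filter]
  apply Finset.card_nbij' (fun p => (p.1 - 1, p.2)) (fun q => (q.1 + 1, q.2))
  · intro p hp
    simp only [Finset.coe_filter, Set.mem_setOf_eq, Finset.mem_coe, Finset.mem_filter,
      List.mem_toFinset, decide_eq_true_iff] at hp ⊢
    refine ⟨hp.2, ?_⟩
    have h1 : p.1 - 1 + 1 = p.1 := by omega
    have : ((p.1 - 1 + 1 : Int), p.2) = p := Prod.ext h1 rfl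
    rw [this]
    exact hp.1
  · intro q hq
    simp only [Finset.coe_filter, Set.mem_setOf_eq, Finset.mem_coe, Finset.mem_filter,
      List.mem_toFinset, decide_eq_true_iff] at hq ⊢
    refine ⟨hq.2, ?_⟩
    have h1 : q.1 + 1 - 1 = q.1 := by omega
    have : ((q.1 + 1 - 1 : Int), q.2) = q := Prod.ext h1 rfl
    rw [this]
    exact hq.1
  · intro p _
    have h1 : p.1 - 1 + 1 = p.1 := by omega
    exact Prod.ext h1 rfl
  · intro q _
    have h1 : q.1 + 1 - 1 = q.1 := by omega
    exact Prod.ext h1 rfl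

-- reflection symmetry of adjacency counts, y direction
lemma countP_shift_y (S : List (Int × Int)) (h : S.Nodup) :
    S.countP (fun p => decide ((p.1, p.2 - 1) ∈ S)) = S.countP (fun p => decide ((p.1, p.2 + 1) ∈ S)) := by
  rw [List.countP_eq_length_filter, List.countP_eq_length_filter,
    ← List.toFinset_card_of_nodup (h.filter _), ← List.toFinset_card_of_nodup (h.filter _),
    List.toFinset_filter, List.toFinset_filter]
  apply Finset.card_nbij' (fun p => (p.1, p.2 - 1)) (fun q => (q.1, q.2 + 1))
  · intro p hp
    simp only [Finset.coe_filter, Set.mem_setOf_eq, Finset.mem_coe, Finset.mem_filter,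
      List.mem_toFinset, decide_eq_true_iff] at hp ⊢
    refine ⟨hp.2, ?_⟩
    have h1 : p.2 - 1 + 1 = p.2 := by omega
    have : (p.1, (p.2 - 1 + 1 : Int)) = p := Prod.ext rfl h1
    rw [this]
    exact hp.1
  · intro q hq
    simp only [Finset.coe_filter, Set.mem_setOf_eq, Finset.mem_coe, Finset.mem_filter,
      List.mem_toFinset, decide_eq_true_iff] at hq ⊢
    refine ⟨hq.2, ?_⟩
    have h1 : q.2 + 1 - 1 = q.2 := by omega
    have : (q.1, (q.2 + 1 - 1 : Int)) = q := Prod.ext rfl h1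
    rw [this]
    exact hq.1
  · intro p _
    have h1 : p.2 - 1 + 1 = p.2 := by omega
    exact Prod.ext rfl h1
  · intro q _
    have h1 : q.2 + 1 - 1 = q.2 := by omega
    exact Prod.ext rfl h1

lemma sum_map_indicator (S : List (Int × Int)) (P : (Int × Int) → Prop) [DecidablePred P] :
    (S.map (fun p => if P p then 1 else 0)).sum = S.countP (fun p => decide (P p)) := by
  induction S with
  | nil => simp
  | cons x t ih => by_cases h : P x <;> simp [List.countP_cons, h, ih, Nat.add_comm]

-- total length of A's neighbour lists = twice the undirected adjacency counts
lemma neighbours_len (S : List (Int × Int)) (h : S.Nodup) :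
    (S.flatMap (fun p => PySem.Set.inter S (surrounding_points p))).length
      = 2 * (S.countP (fun p => decide ((p.1 + 1, p.2) ∈ S))
             + S.countP (fun p => decide ((p.1, p.2 + 1) ∈ S))) := by
  have hcontains : ∀ (l : List (Int × Int)) (a : Int × Int), l.contains a = decide (a ∈ l) := by
    intro l a; simp
  have hsurr_nodup : ∀ p : Int × Int, (surrounding_points p).Nodup := by
    intro p
    simp [surrounding_points, Prod.ext_iff]
    omega
  have hform : ∀ p : Int × Int,
      (PySem.Set.inter S (surrounding_points p)).length
        = ((if (p.1 - 1, p.2) ∈ S then 1 else 0) + (if (p.1, p.2 - 1) ∈ S then 1 else 0))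
          + ((if (p.1 + 1, p.2) ∈ S then 1 else 0) + (if (p.1, p.2 + 1) ∈ S then 1 else 0)) := by
    intro p
    show (S.filter (fun x => (surrounding_points p).contains x)).length = _
    simp only [hcontains]
    rw [filter_mem_length_comm S (surrounding_points p) h (hsurr_nodup p),
      ← List.countP_eq_length_filter]
    simp only [surrounding_points, List.countP_cons, List.countP_nil, decide_eq_true_eq]
    split_ifs <;> omega
  rw [List.length_flatMap]
  rw [List.map_congr_left (fun p _ => hform p)]
  have hsplit : ∀ (l : List (Int × Int)) (f g : (Int × Int) → Nat),
      (l.map (fun p => f p + g p)).sum = (l.map f).sum + (l.map g).sum := by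
    intro l f g
    induction l with
    | nil => simp
    | cons x t ih => simp [ih]; omega
  rw [hsplit S _ _, hsplit S _ _, hsplit S _ _]
  rw [sum_map_indicator S _, sum_map_indicator S _, sum_map_indicator S _, sum_map_indicator S _]
  rw [countP_shift_x S h, countP_shift_y S h]
  omega

-- per-region agreement
-- the two instantiations of scan_count
lemma scan_vertical (S : List (Int × Int)) (h : S.Nodup) :
    ((PySem.List.sorted2 S (fun p => p.1) (fun p => p.2) false).zip
        (PySem.List.sorted2 S (fun p => p.1) (fun p => p.2) false).tail).countP
        (fun ab => decide (ab.2.1 = ab.1.1 ∧ ab.2.2 = ab.1.2 + 1))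
      = S.countP (fun p => decide ((p.1, p.2 + 1) ∈ S)) := by
  set L := PySem.List.sorted2 S (fun p => p.1) (fun p => p.2) false with hL
  have hperm : L.Perm S := PySem.List.sorted2_perm S _ _ false
  have hpw : L.Pairwise (fun a b : Int × Int => a.1 < b.1 ∨ (a.1 = b.1 ∧ a.2 < b.2)) :=
    sorted2_pairwise_lt S h _ _ (fun a b h1 h2 => Prod.ext h1 h2)
  have hscan := scan_count (fun p : Int × Int => (p.1, p.2 + 1))
    (fun a b : Int × Int => a.1 < b.1 ∨ (a.1 = b.1 ∧ a.2 < b.2))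
    (fun a => Or.inr ⟨rfl, lt_add_one a.2⟩) (fun a => by omega) (fun hab hbc => by omega)
    (fun a b hab => by dsimp only; omega) L hpw
  dsimp only at hscan
  have hpred : (L.zip L.tail).countP (fun ab => decide (ab.2.1 = ab.1.1 ∧ ab.2.2 = ab.1.2 + 1))
      = (L.zip L.tail).countP (fun ab => decide (ab.2 = (ab.1.1, ab.1.2 + 1))) := by
    apply List.countP_congr
    intro ab _
    simp [Prod.ext_iff]
  rw [hpred, hscan]
  refine Eq.trans ?_ (List.Perm.countP_eq _ hperm)
  apply List.countP_congr
  intro p _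
  simp [hperm.mem_iff]

lemma scan_horizontal (S : List (Int × Int)) (h : S.Nodup) :
    ((PySem.List.sorted2 S (fun p => p.2) (fun p => p.1) false).zip
        (PySem.List.sorted2 S (fun p => p.2) (fun p => p.1) false).tail).countP
        (fun ab => decide (ab.2.2 = ab.1.2 ∧ ab.2.1 = ab.1.1 + 1))
      = S.countP (fun p => decide ((p.1 + 1, p.2) ∈ S)) := by
  set L := PySem.List.sorted2 S (fun p => p.2) (fun p => p.1) false with hL
  have hperm : L.Perm S := PySem.List.sorted2_perm S _ _ false
  have hpw : L.Pairwise (fun a b : Int × Int => a.2 < b.2 ∨ (a.2 = b.2 ∧ a.1 < b.1)) :=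
    sorted2_pairwise_lt S h _ _ (fun a b h1 h2 => Prod.ext h2 h1)
  have hscan := scan_count (fun p : Int × Int => (p.1 + 1, p.2))
    (fun a b : Int × Int => a.2 < b.2 ∨ (a.2 = b.2 ∧ a.1 < b.1))
    (fun a => Or.inr ⟨rfl, lt_add_one a.1⟩) (fun a => by omega) (fun hab hbc => by omega)
    (fun a b hab => by dsimp only; omega) L hpw
  dsimp only at hscan
  have hpred : (L.zip L.tail).countP (fun ab => decide (ab.2.2 = ab.1.2 ∧ ab.2.1 = ab.1.1 + 1))
      = (L.zip L.tail).countP (fun ab => decide (ab.2 = (ab.1.1 + 1, ab.1.2))) := by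
    apply List.countP_congr
    intro ab _
    simp [Prod.ext_iff]
    tauto
  rw [hpred, hscan]
  refine Eq.trans ?_ (List.Perm.countP_eq _ hperm)
  apply List.countP_congr
  intro p _
  simp [hperm.mem_iff]

-- per-region agreement
lemma group_eq (S : List (Int × Int)) (h : S.Nodup) : pfA_group S = pfB_group S := by
  unfold pfA_group pfB_group
  have hfold : S.foldl (fun ns p => ns ++ PySem.Set.inter S (surrounding_points p))
      ([] : List (Int × Int)) = S.flatMap (fun p => PySem.Set.inter S (surrounding_points p)) := by
    rw [PySem.List.foldl_append_eq_flatMap]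
    simp
  rw [hfold]
  have he1 := foldl_if_count
    (fun ab : (Int × Int) × (Int × Int) => ab.2.1 = ab.1.1 ∧ ab.2.2 = ab.1.2 + 1)
    (((PySem.List.sorted2 S (fun p => p.1) (fun p => p.2) false).zip
        (PySem.List.sorted2 S (fun p => p.1) (fun p => p.2) false).tail)) 0
  have he2 := foldl_if_count
    (fun ab : (Int × Int) × (Int × Int) => ab.2.2 = ab.1.2 ∧ ab.2.1 = ab.1.1 + 1)
    (((PySem.List.sorted2 S (fun p => p.2) (fun p => p.1) false).zip
        (PySem.List.sorted2 S (fun p => p.2) (fun p => p.1) false).tail)) 0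
  simp only [he1, he2, scan_vertical S h, scan_horizontal S h, zero_add]
  have hN := neighbours_len S h
  simp only [Prod.mk.injEq]
  refine ⟨trivial, ?_⟩
  rw [hN]
  push_cast
  ring

-- ===== VERDICT (by name: the statement is the Claim_ definition above) =====
theorem perimeter_fences_spec : Claim_equal_perimeter_fences := by
  intro mapping _
  unfold Spec_perimeter_fences
  have hg : ∀ ps : List (Int × Int),
      pfA_group (PySem.Set.ofList ps) = pfB_group (PySem.Set.ofList ps) :=
    fun ps => group_eq _ (PySem.Set.nodup_ofList ps)
  simp only [perimeter_fences, perimeter_fences_alt, hg]
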